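-- pv_equiv track=rewrite | github.com/filip-husnik/pseudofinder | modules/sleuth.py | gapper
-- ===== SOURCE A (Python) =====
-- def gapper(seq):
--     gapList = []
--     gapListFrame = []
--     gaps = ''
--     for i in seq:
--         if i != '-':
--             if len(gaps) > 0:
--                 if len(gaps) % 3:
--                     gapList.append(gaps)
--                     gaps = ''
--                 else:
--                     gapListFrame.append(gaps)
--                     gaps = ''
--         else:
--             gaps += i
--     return gapList, gapListFrame
-- ===== SOURCE B (Python) =====
-- from itertools import groupby
--
-- def gapper(seq):
--     # Collect maximal runs as (key, length) groups, drop the trailing gap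
--     # group (A never flushes a run at end-of-sequence), then bucket gap runs.
--     groups = [(k, len(list(g))) for k, g in groupby(seq)]
--     if groups and groups[-1][0] == '-':
--         groups.pop()
--     gapList = []
--     gapListFrame = []
--     for k, n in groups:
--         if k == '-':
--             (gapListFrame if n % 3 == 0 else gapList).append('-' * n)
--     return gapList, gapListFrame
-- ===== Notes on version B (the rewrite author's own statement) =====
-- stated objective: idiomatic
-- what changed: B first materializes maximal runs with itertools.groupby as (key, length) pairs, drops a trailing gap group, and then buckets gap runs by length mod 3, instead of A's character-by-character loop with a mutable gap accumulator.
import Mathlib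
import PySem

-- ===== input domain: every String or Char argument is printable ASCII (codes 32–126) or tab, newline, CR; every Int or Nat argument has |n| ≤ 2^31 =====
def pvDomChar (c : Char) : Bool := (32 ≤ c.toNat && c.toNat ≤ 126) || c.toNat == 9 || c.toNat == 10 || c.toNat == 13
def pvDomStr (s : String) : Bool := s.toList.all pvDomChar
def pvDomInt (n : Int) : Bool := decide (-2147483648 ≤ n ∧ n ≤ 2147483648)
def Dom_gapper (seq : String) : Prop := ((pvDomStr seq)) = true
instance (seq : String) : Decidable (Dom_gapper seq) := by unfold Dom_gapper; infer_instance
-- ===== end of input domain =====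

-- B groups the sequence into maximal runs first (itertools.groupby style) and buckets
-- the non-trailing gap runs by length mod 3; more idiomatic, not claimed faster.

-- ===== PORT A =====
-- A's loop over the characters; gaps is the current run of '-' (a Python str, here List Char).
def gapperLoop : List Char → List String → List String → List Char → List String × List String
  | [], gapList, gapListFrame, _ => (gapList, gapListFrame)
  | i :: rest, gapList, gapListFrame, gaps =>
    if i ≠ '-' then
      if gaps.length > 0 then
        if gaps.length % 3 ≠ 0 then gapperLoop rest (gapList ++ [String.ofList gaps]) gapListFrame []
        else gapperLoop rest gapList (gapListFrame ++ [String.ofList gaps]) []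
      else gapperLoop rest gapList gapListFrame gaps
    else gapperLoop rest gapList gapListFrame (gaps ++ [i])

def gapper (seq : String) : List String × List String :=
  gapperLoop seq.toList [] [] []

-- ===== PORT B =====
-- itertools.groupby: maximal runs as (key, length) pairs.
def runsGo (c : Char) (n : Nat) : List Char → List (Char × Nat)
  | [] => [(c, n)]
  | d :: rest => if d = c then runsGo c (n + 1) rest else (c, n) :: runsGo d 1 rest

def runs : List Char → List (Char × Nat)
  | [] => []
  | c :: rest => runsGo c 1 rest

-- "if groups and groups[-1][0] == '-': groups.pop()"
def dropTrailGap (gs : List (Char × Nat)) : List (Char × Nat) :=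
  match gs.getLast? with
  | some (k, _) => if k = '-' then gs.dropLast else gs
  | none => gs

-- the for-loop over groups appending '-'*n to one of the two lists
def flushGo : List (Char × Nat) → List String → List String → List String × List String
  | [], gapList, gapListFrame => (gapList, gapListFrame)
  | (k, n) :: gs, gapList, gapListFrame =>
    if k = '-' then
      if n % 3 = 0 then flushGo gs gapList (gapListFrame ++ [String.ofList (List.replicate n '-')])
      else flushGo gs (gapList ++ [String.ofList (List.replicate n '-')]) gapListFrame
    else flushGo gs gapList gapListFrame

def gapper_alt (seq : String) : List String × List String :=
  flushGo (dropTrailGap (runs seq.toList)) [] []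

-- ===== PRECONDITION & SPEC =====
def Spec_gapper (seq : String) (out : List String × List String) : Prop := out = gapper_alt seq
instance (seq : String) (out : List String × List String) : Decidable (Spec_gapper seq out) := by unfold Spec_gapper; infer_instance

-- ===== CLAIM (what is proved, stated in full; the proofs are below) =====
def Claim_equal_gapper : Prop := ∀ (seq : String), Dom_gapper seq → Spec_gapper seq (gapper seq)

-- ===== LEMMAS AND PROOFS =====

theorem runsGo_ne_nil (c : Char) (n : Nat) (l : List Char) : runsGo c n l ≠ [] := by
  induction l generalizing c n with
  | nil => simp [runsGo]
  | cons d rest ih =>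
    simp only [runsGo]
    split
    · exact ih _ _
    · simp

theorem dropTrailGap_cons (p : Char × Nat) (gs : List (Char × Nat)) (h : gs ≠ []) :
    dropTrailGap (p :: gs) = p :: dropTrailGap gs := by
  rcases (List.eq_nil_or_concat gs) with rfl | ⟨L, b, rfl⟩
  · exact absurd rfl h
  obtain ⟨k, m⟩ := b
  simp only [dropTrailGap, List.concat_eq_append, ← List.cons_append, List.getLast?_concat,
    List.dropLast_concat]
  split <;> rfl

-- runs of "replicate n '-' ++ l", via runsGo
def runsP : Nat → List Char → List (Char × Nat)
  | 0, l => runs l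
  | n + 1, l => runsGo '-' (n + 1) l

-- a leading non-gap run never affects the flushed result
theorem flush_nonGapHead (rest : List Char) (c : Char) (m : Nat) (hc : c ≠ '-')
    (gl glf : List String) :
    flushGo (dropTrailGap (runsGo c m rest)) gl glf
      = flushGo (dropTrailGap (runs rest)) gl glf := by
  induction rest generalizing c m gl glf with
  | nil => simp [runsGo, runs, dropTrailGap, List.getLast?, flushGo, hc]
  | cons d rest' ih =>
    simp only [runsGo, runs]
    by_cases hdc : d = c
    · subst hdc
      rw [if_pos rfl, ih _ _ hc, ih _ _ hc]
    · rw [if_neg hdc, dropTrailGap_cons _ _ (runsGo_ne_nil _ _ _)]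
      simp [flushGo, hc]

theorem key (l : List Char) : ∀ (gl glf : List String) (n : Nat),
    gapperLoop l gl glf (List.replicate n '-')
      = flushGo (dropTrailGap (runsP n l)) gl glf := by
  induction l with
  | nil =>
    intro gl glf n
    cases n with
    | zero => simp [gapperLoop, runsP, runs, dropTrailGap, flushGo]
    | succ k => simp [gapperLoop, runsP, runsGo, dropTrailGap, List.getLast?, flushGo]
  | cons i rest ih =>
    intro gl glf n
    have h0 : ∀ gl' glf', gapperLoop rest gl' glf' [] =
        flushGo (dropTrailGap (runs rest)) gl' glf' := by
      intro gl' glf'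
      have h := ih gl' glf' 0
      simpa [runsP] using h
    by_cases hi : i = '-'
    · subst hi
      have h1 : List.replicate n '-' ++ ['-'] = List.replicate (n + 1) '-' :=
        (List.replicate_succ' (n := n) (a := '-')).symm
      have hL : gapperLoop ('-' :: rest) gl glf (List.replicate n '-')
          = gapperLoop rest gl glf (List.replicate (n + 1) '-') := by
        simp [gapperLoop, h1]
      rw [hL, ih gl glf (n + 1)]
      cases n with
      | zero => simp [runsP, runs]
      | succ k => simp [runsP, runsGo]
    · cases n with
      | zero =>
        have hL : gapperLoop (i :: rest) gl glf (List.replicate 0 '-')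
            = gapperLoop rest gl glf [] := by
          simp [gapperLoop, hi]
        rw [hL, h0]
        simp only [runsP, runs]
        exact (flush_nonGapHead rest i 1 hi gl glf).symm
      | succ k =>
        have hruns : runsP (k + 1) (i :: rest) = ('-', k + 1) :: runsGo i 1 rest := by
          simp [runsP, runsGo, hi]
        rw [hruns, dropTrailGap_cons _ _ (runsGo_ne_nil _ _ _)]
        simp only [gapperLoop, flushGo]
        split_ifs with hA hB hC <;> simp_all [List.length_replicate] <;>
          exact (flush_nonGapHead rest i 1 hA _ _).symm

-- ===== VERDICT (by name: the statement is the Claim_ definition above) =====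
theorem gapper_spec : Claim_equal_gapper := by
  intro seq _
  unfold Spec_gapper gapper gapper_alt
  have := key seq.toList [] [] 0
  simpa [runsP] using this
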